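-- pv_equiv track=rewrite | github.com/ashuping/python3-string-exercise-1 | analyze_data_solution.py | get_advanced_insights
-- ===== SOURCE A (Python) =====
-- def get_advanced_insights(data):
--     vanilla_fan_list, mint_choco_fan_list, strawberry_fan_list, meat_fan_list = [], [], [], []
--
--     '''
--         This time, instead of just counting up the number of fans for each type,
--         you will make a list of human-readable strings that give information on
--         each fan. For example, instead of ending up with
--
--         strawberry_fans = 2
--
--         You would end up with
--
--         strawberry_fan_list = ['lannirth, champion of the green likes strawberry ice cream with gummy dragons on top.', 'lamme, lady of the white likes strawberry ice cream with chocolate chips on top']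
--
--         The exact format for each string should be:
--
--         "DRAGON_NAME_HERE likes FLAVOR_HERE ice cream with TOPPING_HERE on top."
--     '''
--     for result in data:
--         if result[1] == 'vanilla':
--             vanilla_fan_list.append(f'{result[0]} likes {result[1]} ice cream with {result[2]} on top.')
--         elif result[1] == 'mint choco':
--             mint_choco_fan_list.append(f'{result[0]} likes {result[1]} ice cream with {result[2]} on top.')
--         elif result[1] == 'strawberry':
--             strawberry_fan_list.append(f'{result[0]} likes {result[1]} ice cream with {result[2]} on top.')
--         elif result[1] == 'meat':
--             meat_fan_list.append(f'{result[0]} likes {result[1]} ice cream with {result[2]} on top.')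
--
--     return {'vanilla':vanilla_fan_list,'mint_choco':mint_choco_fan_list,"strawberry":strawberry_fan_list,'meat':meat_fan_list}
-- ===== SOURCE B (Python) =====
-- def get_advanced_insights(data):
--     def fans(flavor):
--         return [f'{r[0]} likes {r[1]} ice cream with {r[2]} on top.'
--                 for r in data if r[1] == flavor]
--     return {
--         'vanilla': fans('vanilla'),
--         'mint_choco': fans('mint choco'),
--         'strawberry': fans('strawberry'),
--         'meat': fans('meat'),
--     }
-- ===== Notes on version B (the rewrite author's own statement) =====
-- stated objective: idiomatic
-- what changed: Replaces A's single branching pass with four mutable accumulator lists by one filtered list comprehension per flavor assembled directly into the result dict.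
import Mathlib
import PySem

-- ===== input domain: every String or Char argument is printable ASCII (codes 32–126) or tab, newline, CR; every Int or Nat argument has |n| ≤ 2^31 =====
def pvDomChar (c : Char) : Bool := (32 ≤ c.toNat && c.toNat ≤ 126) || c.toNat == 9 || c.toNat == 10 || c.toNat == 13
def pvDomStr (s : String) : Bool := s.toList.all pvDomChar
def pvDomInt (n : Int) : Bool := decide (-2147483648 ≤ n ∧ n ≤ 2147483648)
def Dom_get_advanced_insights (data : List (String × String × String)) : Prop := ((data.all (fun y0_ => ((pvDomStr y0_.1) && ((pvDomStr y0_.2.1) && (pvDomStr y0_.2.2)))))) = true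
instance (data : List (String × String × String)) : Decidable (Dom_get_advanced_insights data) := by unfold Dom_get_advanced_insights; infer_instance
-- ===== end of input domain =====

-- B replaces A's single branching pass (four mutable accumulators) with one filtered
-- comprehension per flavor assembled directly into the result dict (idiomatic; same cost).

-- ===== PORT A =====
-- the f-string both Pythons build (exact: List Char concatenation, as PySem strings)
def pvMsg (r : String × String × String) : String :=
  String.ofList (r.1.toList ++ " likes ".toList ++ r.2.1.toList ++ " ice cream with ".toList ++ r.2.2.toList ++ " on top.".toList)

def get_advanced_insights (data : List (String × String × String)) : List (String × List String) :=
  let st := data.foldl (fun (acc : List String × List String × List String × List String) result =>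
    if result.2.1 = "vanilla" then (acc.1 ++ [pvMsg result], acc.2.1, acc.2.2.1, acc.2.2.2)
    else if result.2.1 = "mint choco" then (acc.1, acc.2.1 ++ [pvMsg result], acc.2.2.1, acc.2.2.2)
    else if result.2.1 = "strawberry" then (acc.1, acc.2.1, acc.2.2.1 ++ [pvMsg result], acc.2.2.2)
    else if result.2.1 = "meat" then (acc.1, acc.2.1, acc.2.2.1, acc.2.2.2 ++ [pvMsg result])
    else acc) ([], [], [], [])
  [("vanilla", st.1), ("mint_choco", st.2.1), ("strawberry", st.2.2.1), ("meat", st.2.2.2)]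

-- ===== PORT B =====
def pvFans (data : List (String × String × String)) (flavor : String) : List String :=
  data.filterMap (fun r => if r.2.1 = flavor then some (pvMsg r) else none)

def get_advanced_insights_alt (data : List (String × String × String)) : List (String × List String) :=
  [("vanilla", pvFans data "vanilla"), ("mint_choco", pvFans data "mint choco"),
   ("strawberry", pvFans data "strawberry"), ("meat", pvFans data "meat")]

-- ===== PRECONDITION & SPEC =====
def Spec_get_advanced_insights (data : List (String × String × String)) (out : List (String × List String)) : Prop := out = get_advanced_insights_alt data
instance (data : List (String × String × String)) (out : List (String × List String)) : Decidable (Spec_get_advanced_insights data out) := by unfold Spec_get_advanced_insights; infer_instance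

-- ===== CLAIM (what is proved, stated in full; the proofs are below) =====
def Claim_equal_get_advanced_insights : Prop := ∀ (data : List (String × String × String)), Dom_get_advanced_insights data → Spec_get_advanced_insights data (get_advanced_insights data)

-- ===== LEMMAS AND PROOFS =====
theorem pv_fold_inv (data : List (String × String × String))
    (v m s me : List String) :
    data.foldl (fun (acc : List String × List String × List String × List String) result =>
      if result.2.1 = "vanilla" then (acc.1 ++ [pvMsg result], acc.2.1, acc.2.2.1, acc.2.2.2)
      else if result.2.1 = "mint choco" then (acc.1, acc.2.1 ++ [pvMsg result], acc.2.2.1, acc.2.2.2)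
      else if result.2.1 = "strawberry" then (acc.1, acc.2.1, acc.2.2.1 ++ [pvMsg result], acc.2.2.2)
      else if result.2.1 = "meat" then (acc.1, acc.2.1, acc.2.2.1, acc.2.2.2 ++ [pvMsg result])
      else acc) (v, m, s, me)
    = (v ++ pvFans data "vanilla", m ++ pvFans data "mint choco",
       s ++ pvFans data "strawberry", me ++ pvFans data "meat") := by
  induction data generalizing v m s me with
  | nil => simp [pvFans]
  | cons r t ih =>
      simp only [List.foldl_cons, pvFans, List.filterMap_cons]
      by_cases h1 : r.2.1 = "vanilla" <;>
        by_cases h2 : r.2.1 = "mint choco" <;>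
        by_cases h3 : r.2.1 = "strawberry" <;>
        by_cases h4 : r.2.1 = "meat" <;>
        simp [ih, pvFans, h1, h2, h3, h4]

-- ===== VERDICT (by name: the statement is the Claim_ definition above) =====
theorem get_advanced_insights_spec : Claim_equal_get_advanced_insights := by
  intro data _
  unfold Spec_get_advanced_insights get_advanced_insights get_advanced_insights_alt
  simp [pv_fold_inv]
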